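-- pv_equiv track=rewrite | github.com/YhMr2005/Programming1_Oplossingen_Dodona | 15. Sets/dubbels.py | dubbels
-- ===== SOURCE A (Python) =====
-- def dubbels(getallen):
--     uniek = set()
--     niet_uniek = set()
--     for getal in getallen:
--         if getallen.count(getal) == 1:
--             uniek.add(getal)
--         elif getallen.count(getal) > 1:
--             niet_uniek.add(getal)
--     return (uniek, niet_uniek)
-- ===== SOURCE B (Python) =====
-- def dubbels(getallen):
--     seen = set()
--     dups = set()
--     for getal in getallen:
--         if getal in seen:
--             dups.add(getal)
--         else:
--             seen.add(getal)
--     return (seen - dups, seen & dups)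
-- ===== Notes on version B (the rewrite author's own statement) =====
-- stated objective: faster
-- what changed: Replaces A's per-element full-list .count scans with a single membership-driven pass building seen/dups sets, classifying only afterwards via set difference and intersection.
import Mathlib
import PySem

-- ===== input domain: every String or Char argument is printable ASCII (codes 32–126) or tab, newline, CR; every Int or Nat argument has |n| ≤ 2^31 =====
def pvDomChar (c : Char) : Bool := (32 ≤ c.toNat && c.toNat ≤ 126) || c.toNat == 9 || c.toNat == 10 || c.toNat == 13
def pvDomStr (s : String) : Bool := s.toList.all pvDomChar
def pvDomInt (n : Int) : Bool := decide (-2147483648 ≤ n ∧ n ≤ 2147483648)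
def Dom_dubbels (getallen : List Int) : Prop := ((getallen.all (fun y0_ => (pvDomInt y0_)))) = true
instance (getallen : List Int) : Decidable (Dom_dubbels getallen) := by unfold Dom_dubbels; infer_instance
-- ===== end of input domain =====

-- B replaces A's per-element full-list .count scans with one membership-driven pass building
-- seen/dups sets, classifying only afterwards via set difference and intersection (faster).

-- ===== PORT A =====
def dubbels (getallen : List Int) : List Int × List Int :=
  getallen.foldl
    (fun st getal =>
      if PySem.List.count getallen getal == 1 then (PySem.Set.add st.1 getal, st.2)
      else if PySem.List.count getallen getal > 1 then (st.1, PySem.Set.add st.2 getal)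
      else st)
    (PySem.Set.empty, PySem.Set.empty)

-- ===== PORT B =====
def dubbels_alt (getallen : List Int) : List Int × List Int :=
  let st := getallen.foldl
    (fun (st : PySem.Set Int × PySem.Set Int) getal =>
      if PySem.Set.contains st.1 getal then (st.1, PySem.Set.add st.2 getal)
      else (PySem.Set.add st.1 getal, st.2))
    (PySem.Set.empty, PySem.Set.empty)
  (PySem.Set.diff st.1 st.2, PySem.Set.inter st.1 st.2)

-- ===== PRECONDITION & SPEC =====
def Spec_dubbels (getallen : List Int) (out : List Int × List Int) : Prop := out = dubbels_alt getallen
instance (getallen : List Int) (out : List Int × List Int) : Decidable (Spec_dubbels getallen out) := by unfold Spec_dubbels; infer_instance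

-- ===== CLAIM (what is proved, stated in full; the proofs are below) =====
def Claim_equal_dubbels : Prop := ∀ (getallen : List Int), Dom_dubbels getallen → Spec_dubbels getallen (dubbels getallen)

-- ===== LEMMAS AND PROOFS =====

-- A's result: the once-occurring and the multi-occurring elements of the list, each as a
-- first-occurrence-ordered set (`count == 0` is impossible for a visited element).
lemma dubbels_eq_filters (getallen : List Int) :
    dubbels getallen =
      (PySem.Set.ofList (getallen.filter (fun x => PySem.List.count getallen x == 1)),
       PySem.Set.ofList (getallen.filter (fun x => !(PySem.List.count getallen x == 1)))) := by
  unfold dubbels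
  rw [PySem.List.foldl_congr_mem getallen _
    (fun (st : PySem.Set Int × PySem.Set Int) x =>
      ((fun (s : PySem.Set Int) x => if PySem.List.count getallen x == 1 then PySem.Set.add s x else s) st.1 x,
       (fun (s : PySem.Set Int) x => if !(PySem.List.count getallen x == 1) then PySem.Set.add s x else s) st.2 x))
    (PySem.Set.empty, PySem.Set.empty)
    (by
      intro acc x hx
      have hpos : 0 < PySem.List.count getallen x := by
        simpa [PySem.List.count] using List.count_pos_iff.mpr hx
      by_cases h1 : PySem.List.count getallen x == 1
      · simp only [beq_iff_eq, PySem.List.count] at h1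
        simp [h1]
      · have hgt : PySem.List.count getallen x > 1 := by
          simp only [beq_iff_eq] at h1; omega
        simp only [beq_iff_eq, PySem.List.count] at h1
        simp only [PySem.List.count] at hgt
        simp [h1, hgt])]
  rw [PySem.List.foldl_prod_mk
    (fun (s : PySem.Set Int) x => if PySem.List.count getallen x == 1 then PySem.Set.add s x else s)
    (fun (s : PySem.Set Int) x => if !(PySem.List.count getallen x == 1) then PySem.Set.add s x else s)
    getallen PySem.Set.empty PySem.Set.empty]
  rw [PySem.List.foldl_if_eq_foldl_filter, PySem.List.foldl_if_eq_foldl_filter]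
  simp only [PySem.Set.empty]
  rw [← PySem.Set.ofList_eq_foldl, ← PySem.Set.ofList_eq_foldl]

-- B's loop, first component: the running `seen` set is just the fold of Set.add.
lemma bfold_fst (l : List Int) (s t : PySem.Set Int) :
    (l.foldl
      (fun (st : PySem.Set Int × PySem.Set Int) x =>
        if PySem.Set.contains st.1 x then (st.1, PySem.Set.add st.2 x)
        else (PySem.Set.add st.1 x, st.2)) (s, t)).1 = l.foldl PySem.Set.add s := by
  induction l generalizing s t with
  | nil => rfl
  | cons x l ih =>
    simp only [List.foldl_cons]
    by_cases h : PySem.Set.contains s x = true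
    · have hmem : x ∈ s := by simpa [PySem.Set.contains, List.contains_iff_mem] using h
      have hadd : PySem.Set.add s x = s := by
        simp [PySem.Set.add, PySem.Set.contains, List.contains_iff_mem, hmem]
      rw [if_pos h, ih, hadd]
    · rw [if_neg h, ih]

-- B's loop, second component, as a set: exactly the elements occurring twice or more
-- (relative to start state (s, t)).
lemma bfold_snd_mem (l : List Int) (s t : PySem.Set Int) (y : Int) :
    y ∈ (l.foldl
      (fun (st : PySem.Set Int × PySem.Set Int) x =>
        if PySem.Set.contains st.1 x then (st.1, PySem.Set.add st.2 x)
        else (PySem.Set.add st.1 x, st.2)) (s, t)).2 ↔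
      y ∈ t ∨ (y ∈ s ∧ y ∈ l) ∨ 2 ≤ List.count y l := by
  induction l generalizing s t with
  | nil => simp
  | cons x l ih =>
    simp only [List.foldl_cons]
    by_cases hx : x ∈ s
    · rw [if_pos (by simpa [PySem.Set.contains, List.contains_iff_mem] using hx), ih]
      by_cases hyx : y = x
      · subst hyx
        by_cases hyl : y ∈ l
        · have : 0 < List.count y l := List.count_pos_iff.mpr hyl
          simp [PySem.Set.mem_add, hx, hyl, List.count_cons]
        · simp [PySem.Set.mem_add, hx, hyl, List.count_cons]
      · simp [PySem.Set.mem_add, hyx, List.count_cons, Ne.symm hyx]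
    · rw [if_neg (by simpa [PySem.Set.contains, List.contains_iff_mem] using hx), ih]
      by_cases hyx : y = x
      · subst hyx
        by_cases hyl : y ∈ l
        · have h1 : 0 < List.count y l := List.count_pos_iff.mpr hyl
          have h2 : 2 ≤ List.count y (y :: l) := by simp [List.count_cons]; omega
          simp [PySem.Set.mem_add, hx, hyl, h2]
        · have h0 : List.count y l = 0 := List.count_eq_zero.mpr hyl
          simp [PySem.Set.mem_add, hx, hyl, List.count_cons, h0]
      · simp [PySem.Set.mem_add, hyx, List.count_cons, Ne.symm hyx]

-- Building a set from a filtered list = filtering the set built from the list.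
lemma foldl_add_filter (q : Int → Bool) (l s : List Int) :
    (l.filter q).foldl PySem.Set.add (s.filter q) =
      (l.foldl PySem.Set.add s).filter q := by
  induction l generalizing s with
  | nil => rfl
  | cons x l ih =>
    by_cases hq : q x
    · have hstep : PySem.Set.add (s.filter q) x = (PySem.Set.add s x).filter q := by
        by_cases hx : x ∈ s
        · simp [PySem.Set.add, PySem.Set.contains, List.contains_iff_mem, hx, hq]
        · simp [PySem.Set.add, PySem.Set.contains, List.contains_iff_mem, hx, hq,
            List.filter_append]
      simp only [List.filter_cons, hq, if_pos, List.foldl_cons, hstep]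
      exact ih (PySem.Set.add s x)
    · have hstep : (PySem.Set.add s x).filter q = s.filter q := by
        by_cases hx : x ∈ s
        · simp [PySem.Set.add, PySem.Set.contains, List.contains_iff_mem, hx]
        · simp [PySem.Set.add, PySem.Set.contains, List.contains_iff_mem, hx,
            List.filter_append, hq]
      simp only [List.filter_cons, hq, Bool.false_eq_true, if_neg, not_false_iff,
        List.foldl_cons]
      rw [← ih (PySem.Set.add s x), hstep]

lemma ofList_filter (q : Int → Bool) (l : List Int) :
    PySem.Set.ofList (l.filter q) = (PySem.Set.ofList l).filter q := by
  rw [PySem.Set.ofList_eq_foldl, PySem.Set.ofList_eq_foldl]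
  simpa using foldl_add_filter q l []

-- ===== VERDICT (by name: the statement is the Claim_ definition above) =====
theorem dubbels_spec : Claim_equal_dubbels := by
  intro getallen _
  show dubbels getallen = dubbels_alt getallen
  unfold dubbels_alt
  rw [dubbels_eq_filters, ofList_filter, ofList_filter]
  set st := getallen.foldl
    (fun (st : PySem.Set Int × PySem.Set Int) getal =>
      if PySem.Set.contains st.1 getal then (st.1, PySem.Set.add st.2 getal)
      else (PySem.Set.add st.1 getal, st.2))
    (PySem.Set.empty, PySem.Set.empty) with hst
  have h1 : st.1 = PySem.Set.ofList getallen := by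
    rw [hst, bfold_fst]
    simp only [PySem.Set.empty]
    rw [← PySem.Set.ofList_eq_foldl]
  have h2mem : ∀ y, y ∈ st.2 ↔ 2 ≤ List.count y getallen := by
    intro y
    rw [hst]
    simpa [PySem.Set.empty] using bfold_snd_mem getallen PySem.Set.empty PySem.Set.empty y
  simp only [PySem.Set.diff, PySem.Set.inter, h1, Prod.mk.injEq]
  have key : ∀ x ∈ PySem.Set.ofList getallen,
      (PySem.List.count getallen x == 1) = !PySem.Set.contains st.2 x := by
    intro x hx
    have hxg : x ∈ getallen := (PySem.Set.mem_ofList getallen x).mp hx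
    have hpos : 0 < List.count x getallen := List.count_pos_iff.mpr hxg
    by_cases hc2 : 2 ≤ List.count x getallen
    · have hc : PySem.Set.contains st.2 x = true := by
        simp [PySem.Set.contains, List.contains_iff_mem, h2mem x, hc2]
      simp only [hc, Bool.not_true, PySem.List.count, beq_eq_false_iff_ne, ne_eq]
      omega
    · have hnot : x ∉ st.2 := by rw [h2mem x]; omega
      have hc : PySem.Set.contains st.2 x = false := by
        simpa [PySem.Set.contains, List.contains_iff_mem] using hnot
      simp only [hc, Bool.not_false, PySem.List.count, beq_iff_eq]
      omega
  constructor
  · exact List.filter_congr key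
  · refine List.filter_congr ?_
    intro x hx
    have := key x hx
    simp only [PySem.List.count] at this ⊢
    rw [this]
    simp
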